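-- pv_equiv track=rewrite | github.com/cpt-r3tr0/hakerrank-mathematics | Geometry/SherlockAndPlanes.py | solve
-- ===== SOURCE A (Python) =====
-- def solve(points):
--     a0 = list(set([x[0] for x in points]))
--     a1 = list(set([x[1] for x in points]))
--     a2 = list(set([x[2] for x in points]))
--     if len(a0)==1 or len(a1)==1 or len(a2)==1:
--         return 'YES'
--     else:
--         return 'NO'
-- ===== SOURCE B (Python) =====
-- def solve(points):
--     if not points:
--         return 'NO'
--     x, y, z = points[0]
--     lo0, hi0, lo1, hi1, lo2, hi2 = x, x, y, y, z, z
--     for a, b, c in points[1:]: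
--         lo0 = min(lo0, a); hi0 = max(hi0, a)
--         lo1 = min(lo1, b); hi1 = max(hi1, b)
--         lo2 = min(lo2, c); hi2 = max(hi2, c)
--     if lo0 == hi0 or lo1 == hi1 or lo2 == hi2:
--         return 'YES'
--     return 'NO'
-- ===== Notes on version B (the rewrite author's own statement) =====
-- stated objective: alternative
-- what changed: Instead of materializing three deduplicated coordinate sets and testing their sizes, B makes one pass maintaining running min and max per axis and answers YES iff some axis has min == max (a coordinate is uniform iff its extrema coincide).
import Mathlib
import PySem

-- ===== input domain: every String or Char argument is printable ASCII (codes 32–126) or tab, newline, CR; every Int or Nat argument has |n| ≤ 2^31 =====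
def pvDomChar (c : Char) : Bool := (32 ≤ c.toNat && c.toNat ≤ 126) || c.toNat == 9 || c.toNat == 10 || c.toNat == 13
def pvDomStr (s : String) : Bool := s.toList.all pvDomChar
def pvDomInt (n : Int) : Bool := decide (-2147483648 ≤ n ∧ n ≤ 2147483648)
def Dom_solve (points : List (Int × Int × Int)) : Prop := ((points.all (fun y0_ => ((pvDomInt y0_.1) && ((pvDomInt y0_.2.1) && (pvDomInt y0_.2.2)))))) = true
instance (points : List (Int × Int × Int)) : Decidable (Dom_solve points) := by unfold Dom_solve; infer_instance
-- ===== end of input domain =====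

-- B replaces A's three set materializations by a single pass tracking per-axis min/max (an axis is uniform iff min = max); alternative, no intermediate collections.


-- ===== PORT A =====
-- Literal transliteration: three list(set(...)) of the coordinate projections, then length tests.
def solve (points : List (Int × Int × Int)) : String :=
  let a0 := PySem.Set.ofList (points.map (fun x => x.1))
  let a1 := PySem.Set.ofList (points.map (fun x => x.2.1))
  let a2 := PySem.Set.ofList (points.map (fun x => x.2.2))
  if a0.length = 1 ∨ a1.length = 1 ∨ a2.length = 1 then "YES" else "NO"

-- ===== PORT B =====
-- Literal transliteration of Source B: empty guard, then one fold over the tail maintaining the six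
-- running extrema (lo0, hi0, lo1, hi1, lo2, hi2), then the min = max tests.
def solve_alt (points : List (Int × Int × Int)) : String :=
  match points with
  | [] => "NO"
  | (x, y, z) :: rest =>
    let s := rest.foldl
      (fun (s : (Int × Int) × (Int × Int) × (Int × Int)) p =>
        ((min s.1.1 p.1, max s.1.2 p.1),
         (min s.2.1.1 p.2.1, max s.2.1.2 p.2.1),
         (min s.2.2.1 p.2.2, max s.2.2.2 p.2.2)))
      ((x, x), (y, y), (z, z))
    if s.1.1 = s.1.2 ∨ s.2.1.1 = s.2.1.2 ∨ s.2.2.1 = s.2.2.2 then "YES" else "NO"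

-- ===== PRECONDITION & SPEC =====
def Spec_solve (points : List (Int × Int × Int)) (out : String) : Prop := out = solve_alt points
instance (points : List (Int × Int × Int)) (out : String) : Decidable (Spec_solve points out) := by unfold Spec_solve; infer_instance

-- ===== CLAIM (what is proved, stated in full; the proofs are below) =====
def Claim_equal_solve : Prop := ∀ (points : List (Int × Int × Int)), Dom_solve points → Spec_solve points (solve points)

-- ===== LEMMAS AND PROOFS =====

-- A-side characterization: set(v :: m) has exactly one element iff every element of m equals v.
theorem ofList_len_one_iff (a : Int) (l : List Int) :
    (PySem.Set.ofList (a :: l)).length = 1 ↔ l.all (· == a) := by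
  constructor
  · intro h
    rw [List.all_eq_true]
    intro x hx
    by_contra hne
    have hxa : x ≠ a := by simpa using hne
    have hxm : x ∈ PySem.Set.ofList (a :: l) := by
      rw [PySem.Set.mem_ofList]; exact List.mem_cons_of_mem _ hx
    have ham : a ∈ PySem.Set.ofList (a :: l) := by
      rw [PySem.Set.mem_ofList]; exact List.mem_cons_self
    match hs : PySem.Set.ofList (a :: l), h with
    | [b], _ =>
      rw [hs] at hxm ham
      simp at hxm ham
      exact hxa (hxm.trans ham.symm)
  · intro h
    rw [List.all_eq_true] at h
    have : PySem.Set.ofList (a :: l) = [a] := by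
      induction l with
      | nil => rfl
      | cons b t ih =>
        have hb : b = a := by simpa using h b List.mem_cons_self
        have ht : PySem.Set.ofList (a :: t) = [a] := by
          apply ih; intro x hx; exact h x (List.mem_cons_of_mem _ hx)
        subst hb
        simp only [PySem.Set.ofList_eq_foldl, List.foldl_cons] at ht ⊢
        have hdup : PySem.Set.add (PySem.Set.add ([] : PySem.Set Int) b) b
            = PySem.Set.add ([] : PySem.Set Int) b := by
          simp [PySem.Set.add, PySem.Set.contains]
        rw [hdup]
        exact ht
    simp [this]

-- The six-component fold of B splits into three independent min/max pair folds.
theorem fold_split (l : List (Int × Int × Int)) (s : (Int × Int) × (Int × Int) × (Int × Int)) :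
    l.foldl
      (fun (s : (Int × Int) × (Int × Int) × (Int × Int)) p =>
        ((min s.1.1 p.1, max s.1.2 p.1),
         (min s.2.1.1 p.2.1, max s.2.1.2 p.2.1),
         (min s.2.2.1 p.2.2, max s.2.2.2 p.2.2)))
      s
    = ((l.map (fun p => p.1)).foldl (fun q a => (min q.1 a, max q.2 a)) s.1,
       (l.map (fun p => p.2.1)).foldl (fun q a => (min q.1 a, max q.2 a)) s.2.1,
       (l.map (fun p => p.2.2)).foldl (fun q a => (min q.1 a, max q.2 a)) s.2.2) := by
  induction l generalizing s with
  | nil => rfl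
  | cons p t ih => simp only [List.foldl_cons, List.map_cons, ih]

-- B-side characterization: starting the min/max pair fold at (lo, hi) with lo ≤ v ≤ hi,
-- the final min equals the final max iff lo = hi and every element equals v.
theorem minmax_fold_eq_iff (v : Int) (m : List Int) :
    ∀ lo hi : Int, lo ≤ v → v ≤ hi →
      (((m.foldl (fun (q : Int × Int) a => (min q.1 a, max q.2 a)) (lo, hi)).1
        = (m.foldl (fun (q : Int × Int) a => (min q.1 a, max q.2 a)) (lo, hi)).2)
       ↔ (lo = hi ∧ m.all (· == v))) := by
  induction m with
  | nil => intro lo hi h1 h2; simp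
  | cons a t ih =>
    intro lo hi h1 h2
    simp only [List.foldl_cons, List.all_cons, Bool.and_eq_true, beq_iff_eq]
    rw [ih (min lo a) (max hi a) (le_trans (min_le_left _ _) h1) (le_trans h2 (le_max_left _ _))]
    constructor
    · rintro ⟨hmm, ht⟩
      have : lo = hi ∧ a = v := by omega
      exact ⟨this.1, this.2, ht⟩
    · rintro ⟨hlh, hav, ht⟩
      exact ⟨by omega, ht⟩

-- min/max fold from (v, v) over elements mapped by a projection, matched with all-equal.
theorem axis_eq (v : Int) (m : List Int) :
    (((m.foldl (fun (q : Int × Int) a => (min q.1 a, max q.2 a)) (v, v)).1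
      = (m.foldl (fun (q : Int × Int) a => (min q.1 a, max q.2 a)) (v, v)).2)
     ↔ m.all (· == v)) := by
  rw [minmax_fold_eq_iff v m v v le_rfl le_rfl]
  simp

-- ===== VERDICT (by name: the statement is the Claim_ definition above) =====
theorem solve_spec : Claim_equal_solve := by
  intro points _
  unfold Spec_solve
  match points with
  | [] => rfl
  | (x, y, z) :: rest =>
    simp only [solve, solve_alt, List.map_cons, fold_split]
    simp only [ofList_len_one_iff, axis_eq]
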